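-- pv_equiv track=rewrite | github.com/Richarbe/CS454-Antidictionaries | project.py | notInAntiDict
-- ===== SOURCE A (Python) =====
-- def notInAntiDict(antiDict, word):
--     if len(word) >= 1:
--         suf = word
--     else:
--         return True
--
--     for w in antiDict:
--
--         s = suf
--
--         while len(s) >= 1:
--
--             if w == (s + '0') or w == (s + '1'):
--                 return False
--             else:
--                 s = s[1:]
--
--     return True
-- ===== SOURCE B (Python) =====
-- def notInAntiDict(antiDict, word):
--     for w in antiDict:
--         if len(w) >= 2 and w[-1] in ('0', '1') and word.endswith(w[:-1]):
--             return False
--     return True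
-- ===== Notes on version B (the rewrite author's own statement) =====
-- stated objective: simpler
-- what changed: B drops A's inner while-loop over left-trimmed suffixes of word: for each dictionary word w it tests directly whether w is a binary extension (len(w)>=2, last char '0'/'1') whose prefix w[:-1] ends word, using str.endswith.
import Mathlib
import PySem

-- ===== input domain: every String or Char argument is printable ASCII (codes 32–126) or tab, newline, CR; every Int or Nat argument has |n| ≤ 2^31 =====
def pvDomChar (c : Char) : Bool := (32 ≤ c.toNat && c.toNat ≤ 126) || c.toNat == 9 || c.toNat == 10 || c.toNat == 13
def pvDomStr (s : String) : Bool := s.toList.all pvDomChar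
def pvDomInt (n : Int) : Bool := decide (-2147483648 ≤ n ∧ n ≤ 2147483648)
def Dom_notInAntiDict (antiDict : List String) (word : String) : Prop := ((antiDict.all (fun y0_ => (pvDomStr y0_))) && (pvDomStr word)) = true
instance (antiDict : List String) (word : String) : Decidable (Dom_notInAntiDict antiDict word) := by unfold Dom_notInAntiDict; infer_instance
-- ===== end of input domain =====

-- B replaces A's inner while-loop over left-trimmed suffixes by a direct per-word endswith test (simpler).


-- ===== PORT A =====
-- inner 'while len(s) >= 1' loop: s is repeatedly left-trimmed (s = s[1:])
def pvAInner (w : List Char) (s : List Char) : Bool :=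
  match s with
  | [] => false
  | c :: rest =>
    if w = (c :: rest) ++ ['0'] ∨ w = (c :: rest) ++ ['1'] then true
    else pvAInner w rest

-- 'for w in antiDict' loop; returning false when the inner loop hits 'return False'
def pvAFor (antiDict : List String) (suf : List Char) : Bool :=
  match antiDict with
  | [] => true
  | w :: ws => if pvAInner w.toList suf then false else pvAFor ws suf

def notInAntiDict (antiDict : List String) (word : String) : Bool :=
  if 1 ≤ word.toList.length then pvAFor antiDict word.toList else true

-- ===== PORT B =====
-- per-word test: len(w) >= 2 and w[-1] in ('0','1') and word.endswith(w[:-1])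
def pvBCond (w : List Char) (word : List Char) : Bool :=
  decide (2 ≤ PySem.Chars.len w) &&
    (PySem.List.pyGet? w (-1) == some '0' || PySem.List.pyGet? w (-1) == some '1') &&
    PySem.Chars.endswith word (PySem.Chars.slice w none (some (-1)))

def notInAntiDict_alt (antiDict : List String) (word : String) : Bool :=
  match antiDict with
  | [] => true
  | w :: ws => if pvBCond w.toList word.toList then false else notInAntiDict_alt ws word

-- ===== PRECONDITION & SPEC =====
def Spec_notInAntiDict (antiDict : List String) (word : String) (out : Bool) : Prop := out = notInAntiDict_alt antiDict word
instance (antiDict : List String) (word : String) (out : Bool) : Decidable (Spec_notInAntiDict antiDict word out) := by unfold Spec_notInAntiDict; infer_instance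

-- ===== CLAIM (what is proved, stated in full; the proofs are below) =====
def Claim_equal_notInAntiDict : Prop := ∀ (antiDict : List String) (word : String), Dom_notInAntiDict antiDict word → Spec_notInAntiDict antiDict word (notInAntiDict antiDict word)

-- ===== LEMMAS AND PROOFS =====

-- characterisation shared by both inner tests: w is some nonempty suffix of s extended by '0' or '1'
def HitProp (w s : List Char) : Prop :=
  ∃ t, t ≠ [] ∧ t <:+ s ∧ (w = t ++ ['0'] ∨ w = t ++ ['1'])

lemma pvAInner_iff (w s : List Char) : pvAInner w s = true ↔ HitProp w s := by
  induction s with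
  | nil =>
    simp [pvAInner, HitProp]
  | cons c rest ih =>
    simp only [pvAInner]
    constructor
    · intro h
      split_ifs at h with hc
      · exact ⟨c :: rest, by simp, List.suffix_refl _, hc⟩
      · obtain ⟨t, ht0, hts, hw⟩ := ih.mp h
        exact ⟨t, ht0, hts.trans (List.suffix_cons c rest), hw⟩
    · rintro ⟨t, ht0, hts, hw⟩
      rcases List.suffix_cons_iff.mp hts with h1 | h2
      · subst h1
        rcases hw with h | h <;> simp [h]
      · split_ifs with hc
        · rfl
        · exact ih.mpr ⟨t, ht0, h2, hw⟩

lemma pvBCond_iff (w s : List Char) : pvBCond w s = true ↔ HitProp w s := by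
  simp only [pvBCond, PySem.Chars.slice_eq_listSlice, PySem.List.slice_to_neg_one,
    PySem.List.pyGet?_neg_one, Bool.and_eq_true, Bool.or_eq_true, beq_iff_eq,
    decide_eq_true_eq, PySem.Chars.endswith_iff, PySem.Chars.len]
  constructor
  · rintro ⟨⟨hlen, hlast⟩, hsuf⟩
    rcases hlast with h | h
    · obtain ⟨l', rfl⟩ := List.getLast?_eq_some_iff.mp h
      have hl' : l' ≠ [] := by
        intro hnil; subst hnil; simp at hlen
      exact ⟨l', hl', by simpa using hsuf, Or.inl rfl⟩
    · obtain ⟨l', rfl⟩ := List.getLast?_eq_some_iff.mp h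
      have hl' : l' ≠ [] := by
        intro hnil; subst hnil; simp at hlen
      exact ⟨l', hl', by simpa using hsuf, Or.inr rfl⟩
  · rintro ⟨t, ht0, hts, hw⟩
    have htl : t.length ≠ 0 := fun h => ht0 (List.eq_nil_of_length_eq_zero h)
    refine ⟨⟨?_, ?_⟩, ?_⟩
    · rcases hw with h | h <;> subst h <;> simp <;> omega
    · rcases hw with h | h <;> subst h <;> simp
    · rcases hw with h | h <;> subst h <;> simpa using hts

lemma pvAInner_eq_pvBCond (w s : List Char) : pvAInner w s = pvBCond w s := by
  rcases h : pvBCond w s with _ | _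
  · rcases h2 : pvAInner w s with _ | _
    · rfl
    · exact absurd ((pvBCond_iff w s).mpr ((pvAInner_iff w s).mp h2)) (by simp [h])
  · exact (pvAInner_iff w s).mpr ((pvBCond_iff w s).mp h)

lemma pvAFor_eq (ds : List String) (word : String) :
    pvAFor ds word.toList = notInAntiDict_alt ds word := by
  induction ds with
  | nil => rfl
  | cons w ws ih =>
    simp only [pvAFor, notInAntiDict_alt, pvAInner_eq_pvBCond, ih]

lemma pvB_nil_true (ds : List String) (word : String) (h0 : word.toList = []) :
    notInAntiDict_alt ds word = true := by
  induction ds with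
  | nil => rfl
  | cons w ws ih =>
    simp only [notInAntiDict_alt]
    have hc : pvBCond w.toList word.toList = false := by
      rcases h : pvBCond w.toList word.toList with _ | _
      · rfl
      · obtain ⟨t, ht0, hts, _⟩ := (pvBCond_iff _ _).mp h
        rw [h0] at hts
        exact absurd (List.suffix_nil.mp hts) ht0
    rw [hc]
    exact ih

-- ===== VERDICT (by name: the statement is the Claim_ definition above) =====
theorem notInAntiDict_spec : Claim_equal_notInAntiDict := by
  intro antiDict word _
  unfold Spec_notInAntiDict notInAntiDict
  split_ifs with h
  · exact pvAFor_eq antiDict word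
  · refine (pvB_nil_true antiDict word ?_).symm
    cases hl : word.toList with
    | nil => rfl
    | cons c cs => rw [hl] at h; simp at h
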